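-- pv_equiv track=rewrite | github.com/oicr-gsi/waterzooi | generate_assays.py | record_alignment_assay_data
-- ===== SOURCE A (Python) =====
-- def is_lane_level_workflow(workflow, library_type):
--     '''
--     (str, str) -> bool
--
--     Returns True if workflow is a lane level alignment workflow
--     for the specific library type
--
--     Parameters
--     ----------
--     - workflow (str): Workflow name
--     - library_type (str): Library design
--     '''
--
--     # star is the lane level aligner for transcriptomics
--     if library_type == 'WT':
--         return 'star_lane_level' in workflow.lower()
--     else:
--         # other library types use versions of bwamem
--         return 'bwamem' in workflow.lower()
--
-- def record_alignment_assay_data(samples, assay_config):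
--     '''
--     (dict, list) -> dict
--
--     Returns a dictionary with the lane level alignments information of an assay
--
--     Parameters
--     ----------
--     - samples (dict): Dictionary with the sample information of a given assay
--     - assay_config (list): List of workflows for a given assay
--     '''
--
--     D = {}
--
--     for sample in samples:
--         k = sample + 'align'
--         library_type = samples[sample]['library_type']
--         D[k] = {"samples":[sample],"inputs":[],"data":["Sequencing"]}
--         D[k]["workflows"] = [workflow for workflow in assay_config if is_lane_level_workflow(workflow, library_type)]
--
--     return D
-- ===== SOURCE B (Python) =====
-- def record_alignment_assay_data(samples, assay_config):
--     '''
--     (dict, list) -> dict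
--
--     Same result as before, but the two possible workflow lists are
--     computed once from assay_config instead of re-filtering per sample.
--     '''
--     wt_workflows = [w for w in assay_config if 'star_lane_level' in w.lower()]
--     other_workflows = [w for w in assay_config if 'bwamem' in w.lower()]
--     return {
--         sample + 'align': {
--             "samples": [sample],
--             "inputs": [],
--             "data": ["Sequencing"],
--             "workflows": list(wt_workflows if samples[sample]['library_type'] == 'WT'
--                               else other_workflows),
--         }
--         for sample in samples
--     }
-- ===== Notes on version B (the rewrite author's own statement) =====
-- stated objective: faster
-- what changed: B filters assay_config once into the two possible workflow lists (WT vs other) and builds the result with a dict comprehension that picks the precomputed list per sample, instead of re-filtering assay_config with the helper predicate inside the loop for every sample.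
import Mathlib
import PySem

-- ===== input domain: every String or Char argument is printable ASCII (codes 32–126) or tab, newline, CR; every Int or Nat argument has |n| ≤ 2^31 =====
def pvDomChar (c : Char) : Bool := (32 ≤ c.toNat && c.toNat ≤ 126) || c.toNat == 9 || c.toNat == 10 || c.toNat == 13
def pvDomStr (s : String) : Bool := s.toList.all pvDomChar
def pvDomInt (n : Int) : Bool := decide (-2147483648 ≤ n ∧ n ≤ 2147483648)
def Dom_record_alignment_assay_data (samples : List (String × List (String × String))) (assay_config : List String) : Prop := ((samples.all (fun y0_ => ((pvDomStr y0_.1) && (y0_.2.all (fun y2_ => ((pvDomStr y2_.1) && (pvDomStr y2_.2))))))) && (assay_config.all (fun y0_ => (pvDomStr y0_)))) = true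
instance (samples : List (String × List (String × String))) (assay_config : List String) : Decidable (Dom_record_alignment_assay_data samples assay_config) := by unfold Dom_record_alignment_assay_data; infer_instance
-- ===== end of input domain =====

-- B precomputes the two possible filtered workflow lists once instead of re-filtering
-- assay_config for every sample (one pass over assay_config per case, then a dict comprehension).

-- ===== PORT A =====
def is_lane_level_workflow (workflow : String) (library_type : String) : Bool :=
  if library_type == "WT" then
    PySem.Str.isIn "star_lane_level" (PySem.Str.lower workflow)
  else
    PySem.Str.isIn "bwamem" (PySem.Str.lower workflow)

def record_alignment_assay_data (samples : List (String × List (String × String))) (assay_config : List String) : List (String × List (String × List String)) :=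
  -- the Python `samples` parameter is a dict: last duplicate key wins, first position kept
  let samplesD := PySem.Dict.ofList samples
  let D :=
    samplesD.items.foldl (fun D p =>
      let sample := p.1
      let k := String.ofList (sample.toList ++ "align".toList)
      let library_type :=
        ((PySem.Dict.ofList ((samplesD.get? sample).getD [])).get? "library_type").getD ""
      let entry : PySem.Dict String (List String) :=
        PySem.Dict.mk [("samples", [sample]), ("inputs", []), ("data", ["Sequencing"])]
      let entry := entry.insert "workflows"
        (assay_config.filter (fun workflow => is_lane_level_workflow workflow library_type))
      D.insert k entry)
      PySem.Dict.empty
  D.items.map (fun q => (q.1, q.2.items))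

-- ===== PORT B =====
def record_alignment_assay_data_alt (samples : List (String × List (String × String))) (assay_config : List String) : List (String × List (String × List String)) :=
  let wt_workflows := assay_config.filter (fun w => PySem.Str.isIn "star_lane_level" (PySem.Str.lower w))
  let other_workflows := assay_config.filter (fun w => PySem.Str.isIn "bwamem" (PySem.Str.lower w))
  let samplesD := PySem.Dict.ofList samples
  samplesD.items.map (fun p =>
    (String.ofList (p.1.toList ++ "align".toList),
     [("samples", [p.1]), ("inputs", ([] : List String)), ("data", ["Sequencing"]),
      ("workflows",
        if ((PySem.Dict.ofList ((samplesD.get? p.1).getD [])).get? "library_type").getD "" == "WT"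
        then wt_workflows else other_workflows)]))

-- ===== PRECONDITION & SPEC =====
-- Pre_ excludes exactly the inputs where some sample record has no 'library_type' key, on
-- which the Python A raises KeyError.
def Pre_record_alignment_assay_data (samples : List (String × List (String × String))) (assay_config : List String) : Prop :=
  ∀ p ∈ (PySem.Dict.ofList samples).items,
    ((PySem.Dict.ofList p.2).get? "library_type").isSome = true
instance (samples : List (String × List (String × String))) (assay_config : List String) : Decidable (Pre_record_alignment_assay_data samples assay_config) := by unfold Pre_record_alignment_assay_data; infer_instance

def pvWitness_record_alignment_assay_data : (List (String × List (String × String))) × List String :=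
  ([("s1", [("library_type", "WT")]), ("s2", [("library_type", "PG")])],
   ["STAR_Lane_Level_v1", "bwaMem_v2", "other"])

def Spec_record_alignment_assay_data (samples : List (String × List (String × String))) (assay_config : List String) (out : List (String × List (String × List String))) : Prop := out = record_alignment_assay_data_alt samples assay_config
instance (samples : List (String × List (String × String))) (assay_config : List String) (out : List (String × List (String × List String))) : Decidable (Spec_record_alignment_assay_data samples assay_config out) := by unfold Spec_record_alignment_assay_data; infer_instance

-- ===== CLAIM (what is proved, stated in full; the proofs are below) =====
def Claim_equal_record_alignment_assay_data : Prop := ∀ (samples : List (String × List (String × String))) (assay_config : List String), Dom_record_alignment_assay_data samples assay_config → Pre_record_alignment_assay_data samples assay_config → Spec_record_alignment_assay_data samples assay_config (record_alignment_assay_data samples assay_config)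

-- ===== LEMMAS AND PROOFS =====

theorem key_fun_injective : Function.Injective (fun s : String => String.ofList (s.toList ++ "align".toList)) := by
  intro a b h
  have h' : a.toList ++ "align".toList = b.toList ++ "align".toList := String.ofList_inj.mp h
  have := List.append_cancel_right h'
  exact String.toList_injective this

theorem main_eq (samples : List (String × List (String × String))) (assay_config : List String) :
    record_alignment_assay_data samples assay_config = record_alignment_assay_data_alt samples assay_config := by
  simp only [record_alignment_assay_data, record_alignment_assay_data_alt]
  have hnd : ((PySem.Dict.ofList samples).items.map
      (fun p : String × List (String × String) => String.ofList (p.1.toList ++ "align".toList))).Nodup := by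
    have h1 : ((PySem.Dict.ofList samples).items.map (·.1)).Nodup :=
      PySem.Dict.nodup_keys_ofList samples
    have : ((PySem.Dict.ofList samples).items.map (·.1)).map
        (fun s : String => String.ofList (s.toList ++ "align".toList)) =
        (PySem.Dict.ofList samples).items.map
        (fun p : String × List (String × String) => String.ofList (p.1.toList ++ "align".toList)) := by
      simp [List.map_map, Function.comp]
    rw [← this]
    exact h1.map key_fun_injective
  rw [PySem.Dict.items_foldl_insert_fresh _ _ _ _ (by intro a _; simp) hnd]
  simp only [PySem.Dict.empty, List.nil_append, List.map_map]
  apply List.map_congr_left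
  intro p _
  simp only [Function.comp]
  simp [is_lane_level_workflow, PySem.Dict.items_insert]
  split <;> rename_i hC <;> simp only [hC, if_true, if_false, List.filter_congr, ite_true, ite_false] <;> simp [hC]

-- ===== VERDICT (by name: the statement is the Claim_ definition above) =====
theorem record_alignment_assay_data_spec : Claim_equal_record_alignment_assay_data := by
  intro samples assay_config _ _
  unfold Spec_record_alignment_assay_data
  exact main_eq samples assay_config
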